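-- pv_equiv track=rewrite | github.com/dayitachaudhuri/LeetCode-Solutions | 2264-largest-3-same-digit-number-in-string/2264-largest-3-same-digit-number-in-string.py | largestGoodInteger
-- ===== SOURCE A (Python) =====
-- def largestGoodInteger(num: str) -> str:
--     lst=[0]*10
--     count=0
--     maxVal=""
--     for i in range(1,len(num)):
--         if num[i]==num[i-1]:
--             count+=1
--         else:
--             count=0
--         if count==2:
--             if maxVal=="" or int(num[i]*3)>int(maxVal):
--                 maxVal=num[i]*3
--
--     return maxVal
-- ===== SOURCE B (Python) =====
-- def largestGoodInteger(num: str) -> str: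
--     for d in range(9, -1, -1):
--         t = str(d) * 3
--         if t in num:
--             return t
--     return ""
-- ===== Notes on version B (the rewrite author's own statement) =====
-- stated objective: simpler
-- what changed: Replaced the single-pass consecutive-run counter with max tracking by probing the ten three-same-digit candidate strings in descending digit order via substring membership and returning the first hit.
-- outside the precondition, e.g. on largestGoodInteger('aaa'): A returns 'aaa', B returns ''; on largestGoodInteger('12aaa'): A returns 'aaa', B returns ''
import Mathlib
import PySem

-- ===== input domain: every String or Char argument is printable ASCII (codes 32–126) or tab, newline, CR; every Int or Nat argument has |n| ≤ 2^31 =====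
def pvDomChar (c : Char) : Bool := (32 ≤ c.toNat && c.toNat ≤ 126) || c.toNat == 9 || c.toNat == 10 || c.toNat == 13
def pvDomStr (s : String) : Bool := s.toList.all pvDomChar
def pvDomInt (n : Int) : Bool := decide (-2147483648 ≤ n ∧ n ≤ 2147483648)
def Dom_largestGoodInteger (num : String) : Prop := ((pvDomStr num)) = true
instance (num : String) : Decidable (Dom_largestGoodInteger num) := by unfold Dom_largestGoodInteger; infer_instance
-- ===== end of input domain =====

-- B replaces A's one-pass consecutive-run counter by probing the ten three-same-digit candidate
-- strings in descending digit order with a substring test (objective: simpler).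

-- ===== PORT A =====
def largestGoodInteger (num : String) : String :=
  let _lst := List.replicate 10 (0 : Int)
  (((PySem.List.pyRange 1 (PySem.Str.len num) 1).foldl (fun (st : Int × String) i =>
    let ci := (PySem.Str.pyGet? num i).getD ' '
    let cp := (PySem.Str.pyGet? num (i - 1)).getD ' '
    let count : Int := if ci = cp then st.1 + 1 else 0
    let maxVal := if count = 2 then
        (if st.2 = "" ∨ (PySem.Int.ofStr? (String.ofList [ci, ci, ci])).getD 0
                          > (PySem.Int.ofStr? st.2).getD 0
         then String.ofList [ci, ci, ci] else st.2)
      else st.2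
    (count, maxVal)) ((0 : Int), ""))).2

-- ===== PORT B =====
def lgiProbe (num : String) : List Int → String
  | [] => ""
  | d :: rest =>
    let t := PySem.Int.toStr d
    let t3 := t ++ t ++ t
    if PySem.Str.isIn t3 num then t3 else lgiProbe num rest

def largestGoodInteger_alt (num : String) : String :=
  lgiProbe num (PySem.List.pyRange 9 (-1) (-1))

-- ===== PRECONDITION & SPEC =====
-- Pre_ excludes strings containing a triple of a non-digit character (outside the function's
-- numeric-string domain): there A either raises ValueError on an int() comparison or returns
-- the non-digit triple itself, while B naturally returns the largest digit triple or "".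
def pvAllTriplesDigit (num : String) : Bool :=
  num.toList.all (fun c => !(decide ([c, c, c] <:+: num.toList)) || c.isDigit)

def Pre_largestGoodInteger (num : String) : Prop := pvAllTriplesDigit num = true

instance (num : String) : Decidable (Pre_largestGoodInteger num) := by
  unfold Pre_largestGoodInteger; infer_instance

def pvWitness_largestGoodInteger : String := "1222"

def Spec_largestGoodInteger (num : String) (out : String) : Prop := out = largestGoodInteger_alt num
instance (num : String) (out : String) : Decidable (Spec_largestGoodInteger num out) := by
  unfold Spec_largestGoodInteger; infer_instance

-- ===== CLAIM (what is proved, stated in full; the proofs are below) =====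
def Claim_equal_largestGoodInteger : Prop := ∀ (num : String), Dom_largestGoodInteger num → Pre_largestGoodInteger num → Spec_largestGoodInteger num (largestGoodInteger num)

-- ===== LEMMAS AND PROOFS =====

-- the triple string "ccc" and its int value
def trip (c : Char) : String := String.ofList [c, c, c]
def val3 (c : Char) : Int := (PySem.Int.ofStr? (trip c)).getD 0

-- A's maxVal update, abstracted
def step2 (m : String) (c : Char) : String :=
  if m = "" ∨ val3 c > (PySem.Int.ofStr? m).getD 0 then trip c else m

-- one iteration of A's loop, given previous char p and current char c
def aStep (p c : Char) (st : Int × String) : Int × String :=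
  ((if c = p then st.1 + 1 else 0),
   if (if c = p then st.1 + 1 else 0) = 2 then step2 st.2 c else st.2)

-- A's loop as structural recursion over the remaining characters
def aRun (p : Char) (st : Int × String) : List Char → Int × String
  | [] => st
  | c :: rest => aRun c (aStep p c st) rest

-- the characters A records (first triple of each run), with run state k
def tri (p : Char) (k : Int) : List Char → List Char
  | [] => []
  | c :: rest =>
    if (if c = p then k + 1 else 0) = 2 then c :: tri c (if c = p then k + 1 else 0) rest
    else tri c (if c = p then k + 1 else 0) rest

def TL : List Char → List Char
  | [] => []
  | c0 :: rest => tri c0 0 rest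

def encT : Option Char → String
  | none => ""
  | some c => trip c

def omax (o : Option Char) (c : Char) : Option Char :=
  some (match o with | none => c | some x => if val3 c > val3 x then c else x)

def dchar (d : Nat) : Char := Char.ofNat (48 + d)
def t3 (d : Int) : String := PySem.Int.toStr d ++ PySem.Int.toStr d ++ PySem.Int.toStr d
def dig9 : List Int := [9, 8, 7, 6, 5, 4, 3, 2, 1, 0]

lemma portA_foldl (num : String) :
    largestGoodInteger num =
      ((PySem.List.pyRange 1 ((num.toList.length : Int)) 1).foldl
        (fun st i => aStep ((PySem.List.pyGet? num.toList (i - 1)).getD ' ')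
                           ((PySem.List.pyGet? num.toList i).getD ' ') st)
        ((0 : Int), "")).2 := by
  have h1 : PySem.Str.len num = ((num.toList.length : Nat) : Int) := by simp
  unfold largestGoodInteger
  rw [h1]
  rfl

lemma foldl_aRun (v : List Char) : ∀ (u : List Char) (p : Char) (st : Int × String),
    (PySem.List.pyRange ((u.length : Int) + 1) (((u ++ p :: v).length : Int)) 1).foldl
      (fun st i => aStep ((PySem.List.pyGet? (u ++ p :: v) (i - 1)).getD ' ')
                         ((PySem.List.pyGet? (u ++ p :: v) i).getD ' ') st) st
      = aRun p st v := by
  induction v with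
  | nil =>
    intro u p st
    have hlen : (((u ++ [p]).length : Nat) : Int) = (u.length : Int) + 1 := by
      simp [List.length_append]
    rw [hlen, show PySem.List.pyRange ((u.length : Int) + 1) ((u.length : Int) + 1) 1 = []
        from by simp [PySem.List.pyRange]]
    rfl
  | cons c v' ih =>
    intro u p st
    have hl : u ++ p :: c :: v' = (u ++ [p]) ++ c :: v' := by simp
    have hlt : (u.length : Int) + 1 < (((u ++ p :: c :: v').length : Nat) : Int) := by
      simp [List.length_append]
    rw [PySem.List.pyRange_one_cons hlt, List.foldl_cons]
    have hg1 : PySem.List.pyGet? (u ++ p :: c :: v') ((u.length : Int) + 1 - 1) = some p := by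
      have : (u.length : Int) + 1 - 1 = ((u.length : Nat) : Int) := by ring
      rw [this, PySem.List.pyGet?_append_length]
    have hg2 : PySem.List.pyGet? (u ++ p :: c :: v') ((u.length : Int) + 1) = some c := by
      have h2 : (u.length : Int) + 1 = (((u ++ [p]).length : Nat) : Int) := by
        simp [List.length_append]
      rw [h2, hl, PySem.List.pyGet?_append_length]
    rw [hg1, hg2]
    have hstep : aStep ((some p).getD ' ') ((some c).getD ' ') st = aStep p c st := rfl
    rw [hstep]
    have hl2 : (u.length : Int) + 1 + 1 = (((u ++ [p]).length : Nat) : Int) + 1 := by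
      simp [List.length_append]
    calc (PySem.List.pyRange ((u.length : Int) + 1 + 1) (((u ++ p :: c :: v').length : Nat) : Int) 1).foldl
          (fun st i => aStep ((PySem.List.pyGet? (u ++ p :: c :: v') (i - 1)).getD ' ')
                             ((PySem.List.pyGet? (u ++ p :: c :: v') i).getD ' ') st) (aStep p c st)
        = (PySem.List.pyRange ((((u ++ [p]).length : Nat) : Int) + 1) ((((u ++ [p]) ++ c :: v').length : Nat) : Int) 1).foldl
          (fun st i => aStep ((PySem.List.pyGet? ((u ++ [p]) ++ c :: v') (i - 1)).getD ' ')
                             ((PySem.List.pyGet? ((u ++ [p]) ++ c :: v') i).getD ' ') st) (aStep p c st) := by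
          rw [← hl, ← hl2]
      _ = aRun c (aStep p c st) v' := ih (u ++ [p]) c (aStep p c st)
      _ = aRun p st (c :: v') := rfl

lemma aRun_snd : ∀ (l : List Char) (p : Char) (k : Int) (m : String),
    (aRun p (k, m) l).2 = (tri p k l).foldl step2 m := by
  intro l
  induction l with
  | nil => intro p k m; rfl
  | cons c rest ih =>
    intro p k m
    rw [aRun, aStep, tri]
    by_cases h : (if c = p then k + 1 else 0) = 2
    · simp only [h, if_pos]
      rw [ih, List.foldl_cons]
    · simp only [h, if_false]
      rw [ih]

lemma prefix_single (c : Char) (l : List Char) : ([c] <+: l) ↔ l.head? = some c := by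
  cases l <;> simp [List.cons_prefix_cons, eq_comm]

lemma infix_cons_of_ne (c a : Char) (l : List Char) (h : c ≠ a) :
    ([c, c, c] <:+: a :: l) ↔ [c, c, c] <:+: l := by
  rw [List.infix_cons_iff]
  simp [List.cons_prefix_cons, h]

lemma infix_dropWhile (c p : Char) (h : c ≠ p) : ∀ (l : List Char),
    ([c, c, c] <:+: l.dropWhile (· == p)) ↔ [c, c, c] <:+: l := by
  intro l
  induction l with
  | nil => simp
  | cons x r ih =>
    by_cases hx : x = p
    · rw [List.dropWhile_cons_of_pos (by simp [hx]), ih, hx, infix_cons_of_ne c p r h]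
    · rw [List.dropWhile_cons_of_neg (by simp [hx])]

lemma infix_cons_ne (c p x : Char) (r : List Char) (h : x ≠ p) :
    ([c, c, c] <:+: p :: x :: r) ↔ [c, c, c] <:+: x :: r := by
  rw [List.infix_cons_iff]
  constructor
  · rintro (hpre | hin)
    · rw [List.cons_prefix_cons] at hpre
      obtain ⟨rfl, hpre⟩ := hpre
      rw [List.cons_prefix_cons] at hpre
      exact absurd hpre.1.symm h
    · exact hin
  · exact Or.inr

lemma infix_cons_self (c p : Char) (r : List Char) :
    ([c, c, c] <:+: p :: p :: r) ↔ ((c = p ∧ r.head? = some p) ∨ [c, c, c] <:+: p :: r) := by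
  rw [List.infix_cons_iff]
  constructor
  · rintro (hpre | hin)
    · rw [List.cons_prefix_cons] at hpre
      obtain ⟨rfl, hpre⟩ := hpre
      rw [List.cons_prefix_cons] at hpre
      obtain ⟨-, hpre⟩ := hpre
      exact Or.inl ⟨rfl, by rw [← (prefix_single c r).1 hpre]⟩
    · exact Or.inr hin
  · rintro (⟨rfl, hh⟩ | hin)
    · exact Or.inl ((List.cons_prefix_cons).2 ⟨rfl,
        (List.cons_prefix_cons).2 ⟨rfl, (prefix_single c r).2 hh⟩⟩)
    · exact Or.inr hin

lemma infix_triple_nil (c p : Char) : ¬ ([c, c, c] <:+: [p]) := by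
  intro h
  have := h.length_le
  simp at this

lemma tri_x_eq (p : Char) (k : Int) (r : List Char) :
    tri p k (p :: r) = if k = 1 then p :: tri p 2 r else tri p (k + 1) r := by
  rw [tri]
  by_cases h : k = 1
  · subst h
    norm_num
  · have h2 : ¬ (k + 1 = 2) := by omega
    simp [h2, h]

lemma tri_x_ne (p x : Char) (k : Int) (r : List Char) (h : ¬ x = p) :
    tri p k (x :: r) = tri x 0 r := by
  rw [tri]
  simp [h]

lemma tri_mem : ∀ (l : List Char) (c p : Char),
    (c ∈ tri p 0 l ↔ [c, c, c] <:+: (p :: l)) ∧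
    (c ∈ tri p 1 l ↔ ((c = p ∧ l.head? = some p) ∨ [c, c, c] <:+: (p :: l))) ∧
    (∀ k : Int, 2 ≤ k → (c ∈ tri p k l ↔ [c, c, c] <:+: (l.dropWhile (· == p)))) := by
  intro l
  induction l with
  | nil =>
    intro c p
    refine ⟨?_, ?_, ?_⟩
    · simp only [tri, List.not_mem_nil, false_iff]
      exact infix_triple_nil c p
    · simp only [tri, List.not_mem_nil, false_iff, List.head?_nil]
      rintro (⟨-, h⟩ | h)
      · cases h
      · exact infix_triple_nil c p h
    · intro k _
      simp only [tri, List.not_mem_nil, false_iff, List.dropWhile_nil]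
      intro h
      simp at h
  | cons x r ih =>
    intro c p
    refine ⟨?_, ?_, ?_⟩
    · -- k = 0
      by_cases hxp : x = p
      · subst hxp
        rw [tri_x_eq x 0 r, if_neg (by norm_num : ¬ (0 : Int) = 1),
          show (0 : Int) + 1 = 1 from by norm_num]
        rw [(ih c x).2.1, infix_cons_self c x r]
      · rw [tri_x_ne p x 0 r hxp, (ih c x).1, infix_cons_ne c p x r hxp]
    · -- k = 1
      by_cases hxp : x = p
      · subst hxp
        rw [tri_x_eq x 1 r, if_pos rfl, List.mem_cons, (ih c x).2.2 2 (by omega),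
          List.head?_cons, infix_cons_self c x r]
        by_cases hcx : c = x
        · simp [hcx]
        · simp only [hcx, false_and, false_or]
          rw [infix_dropWhile c x hcx r, infix_cons_of_ne c x r hcx]
      · rw [tri_x_ne p x 1 r hxp, (ih c x).1, infix_cons_ne c p x r hxp, List.head?_cons]
        simp [Option.some.injEq, hxp]
    · -- k ≥ 2
      intro k hk
      by_cases hxp : x = p
      · subst hxp
        rw [tri_x_eq x k r, if_neg (by omega : ¬ k = 1), (ih c x).2.2 (k + 1) (by omega),
          List.dropWhile_cons_of_pos (by simp)]
      · rw [tri_x_ne p x k r hxp, (ih c x).1,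
          List.dropWhile_cons_of_neg (by simp [hxp])]

lemma TL_mem (L : List Char) (c : Char) : c ∈ TL L ↔ [c, c, c] <:+: L := by
  cases L with
  | nil => simp [TL]
  | cons c0 rest => exact (tri_mem rest c c0).1

lemma trip_ne_empty (c : Char) : trip c ≠ "" := by
  simp [trip]

lemma step2_encT (o : Option Char) (c : Char) : step2 (encT o) c = encT (omax o c) := by
  cases o with
  | none => simp [step2, encT, omax]
  | some x =>
    simp only [encT, omax, step2, trip_ne_empty x, false_or]
    have hv : (PySem.Int.ofStr? (trip x)).getD 0 = val3 x := rfl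
    rw [hv]
    split <;> rfl

lemma foldl_encT : ∀ (l : List Char) (o : Option Char),
    l.foldl step2 (encT o) = encT (l.foldl omax o) := by
  intro l
  induction l with
  | nil => intro o; rfl
  | cons c r ih =>
    intro o
    simp only [List.foldl_cons, step2_encT]
    exact ih _

lemma foldl_omax_some : ∀ (l : List Char) (x : Char), ∃ M, l.foldl omax (some x) = some M := by
  intro l
  induction l with
  | nil => exact fun x => ⟨x, rfl⟩
  | cons c r ih => intro x; simpa [omax] using ih _

lemma foldl_omax_nil_none (l : List Char) (h : l.foldl omax none = none) : l = [] := by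
  cases l with
  | nil => rfl
  | cons c r =>
    obtain ⟨M, hM⟩ := foldl_omax_some r c
    simp only [List.foldl_cons, show omax none c = some c from rfl] at h
    rw [hM] at h
    cases h

lemma foldl_omax_mem : ∀ (l : List Char) (o : Option Char) (M : Char),
    l.foldl omax o = some M → M ∈ l ∨ o = some M := by
  intro l
  induction l with
  | nil => intro o M h; exact Or.inr h
  | cons c r ih =>
    intro o M h
    rcases ih _ _ h with hm | he
    · exact Or.inl (List.mem_cons_of_mem _ hm)
    · cases o with
      | none =>
        simp only [omax] at he
        obtain rfl : c = M := by simpa using he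
        exact Or.inl (List.mem_cons_self ..)
      | some x =>
        simp only [omax, Option.some.injEq] at he
        split at he
        · exact Or.inl (he ▸ List.mem_cons_self ..)
        · exact Or.inr (by rw [he])

lemma foldl_omax_ub : ∀ (l : List Char) (o : Option Char) (M : Char),
    l.foldl omax o = some M →
      (∀ c ∈ l, ¬ (val3 M < val3 c)) ∧ (∀ x, o = some x → ¬ (val3 M < val3 x)) := by
  intro l
  induction l with
  | nil =>
    intro o M h
    refine ⟨by simp, ?_⟩
    intro x hx
    rw [hx] at h
    obtain rfl : x = M := by simpa using h
    omega
  | cons c r ih =>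
    intro o M h
    obtain ⟨hr, ho⟩ := ih _ _ h
    have hc : ¬ (val3 M < val3 c) ∧ (∀ x, o = some x → ¬ (val3 M < val3 x)) := by
      cases o with
      | none =>
        refine ⟨ho c rfl, ?_⟩
        intro x hx; cases hx
      | some x =>
        have := ho (if val3 c > val3 x then c else x) rfl
        split at this
        · refine ⟨this, ?_⟩
          intro y hy
          obtain rfl : x = y := by simpa using hy
          omega
        · refine ⟨by omega, ?_⟩
          intro y hy
          obtain rfl : x = y := by simpa using hy
          exact this
    refine ⟨?_, hc.2⟩
    intro c' hc'
    rcases List.mem_cons.1 hc' with rfl | hm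
    · exact hc.1
    · exact hr _ hm

lemma isDigit_bounds (c : Char) (h : c.isDigit) : 48 ≤ c.toNat ∧ c.toNat ≤ 57 := by
  simp only [Char.isDigit, Bool.and_eq_true, decide_eq_true_eq, UInt32.le_iff_toNat_le] at h
  have h0 : ('0').val.toNat = 48 := rfl
  have h9 : ('9').val.toNat = 57 := rfl
  have hc : c.toNat = c.val.toNat := rfl
  constructor <;> omega

lemma digit_eq_dchar (c : Char) (h : c.isDigit) : ∃ d, d < 10 ∧ c = dchar d := by
  obtain ⟨h1, h2⟩ := isDigit_bounds c h
  refine ⟨c.toNat - 48, by omega, ?_⟩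
  unfold dchar
  have : 48 + (c.toNat - 48) = c.toNat := by omega
  rw [this, Char.ofNat_toNat]

lemma val3_lt_iff : ∀ d : Nat, d < 10 → ∀ e : Nat, e < 10 →
    (val3 (dchar e) < val3 (dchar d) ↔ e < d) := by decide

lemma dchar_mem_dig9 : ∀ d : Nat, d < 10 → ((d : Int) ∈ dig9) := by decide

lemma t3_dchar : ∀ d : Nat, d < 10 → (t3 (d : Int)).toList = [dchar d, dchar d, dchar d] := by decide

lemma t3_eq_trip : ∀ d : Nat, d < 10 → t3 ((d : Nat) : Int) = trip (dchar d) := by decide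

lemma dig9_sorted : dig9.Pairwise (· > ·) := by decide

lemma dig9_bounds : ∀ d ∈ dig9, 0 ≤ d ∧ d < 10 := by decide

lemma isIn_eq_decide (sub s : String) :
    PySem.Str.isIn sub s = decide (sub.toList <:+: s.toList) := by
  by_cases h : sub.toList <:+: s.toList
  · simp only [h, decide_true]
    exact (PySem.Str.isIn_iff_infix sub s).2 h
  · simp only [h, decide_false]
    rcases hb : PySem.Str.isIn sub s with _ | _
    · rfl
    · exact absurd ((PySem.Str.isIn_iff_infix sub s).1 hb) h

lemma lgiProbe_find? (num : String) : ∀ (ds : List Int),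
    lgiProbe num ds =
      (match ds.find? (fun d => PySem.Str.isIn (t3 d) num) with
        | some d => t3 d | none => "") := by
  intro ds
  induction ds with
  | nil => rfl
  | cons d rest ih =>
    rcases hb : PySem.Str.isIn (t3 d) num with _ | _
    · rw [List.find?_cons_of_neg (by simpa using hb), ← ih]
      simp only [lgiProbe]
      rw [show (PySem.Int.toStr d ++ PySem.Int.toStr d ++ PySem.Int.toStr d) = t3 d from rfl, hb]
      simp
    · rw [List.find?_cons_of_pos (by simpa using hb)]
      simp only [lgiProbe]
      rw [show (PySem.Int.toStr d ++ PySem.Int.toStr d ++ PySem.Int.toStr d) = t3 d from rfl, hb]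
      simp

lemma find?_max (p : Int → Bool) : ∀ (ds : List Int) (d₀ : Int),
    ds.Pairwise (· > ·) → d₀ ∈ ds → p d₀ = true → (∀ d ∈ ds, p d = true → d ≤ d₀) →
    ds.find? p = some d₀ := by
  intro ds
  induction ds with
  | nil => intro d₀ _ h; cases h
  | cons d r ih =>
    intro d₀ hsort hmem hp hmax
    rcases List.mem_cons.1 hmem with rfl | hm
    · exact List.find?_cons_of_pos hp
    · have hgt : d > d₀ := (List.pairwise_cons.1 hsort).1 _ hm
      have hpd : p d = false := by
        rcases hb : p d with _ | _
        · rfl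
        · have := hmax d (List.mem_cons_self ..) hb
          omega
      rw [List.find?_cons_of_neg (by simp [hpd])]
      exact ih d₀ (List.pairwise_cons.1 hsort).2 hm hp
        (fun x hx hpx => hmax x (List.mem_cons_of_mem _ hx) hpx)

lemma pre_forall (num : String) (h : Pre_largestGoodInteger num) :
    ∀ c ∈ num.toList, [c, c, c] <:+: num.toList → c.isDigit := by
  simp only [Pre_largestGoodInteger, pvAllTriplesDigit, List.all_eq_true] at h
  intro c hc hinf
  simpa [hinf] using h c hc

lemma A_eq (num : String) : largestGoodInteger num = encT ((TL num.toList).foldl omax none) := by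
  rw [portA_foldl]
  rcases hL : num.toList with _ | ⟨c0, rest⟩
  · simp only [List.length_nil, Nat.cast_zero]
    rw [show PySem.List.pyRange 1 0 1 = [] from by decide]
    rfl
  · have h := foldl_aRun rest [] c0 ((0 : Int), "")
    simp only [List.nil_append, List.length_nil, Nat.cast_zero, zero_add] at h
    rw [h, show (aRun c0 ((0 : Int), "") rest).2 = (tri c0 0 rest).foldl step2 ""
        from aRun_snd rest c0 0 "", show ("" : String) = encT none from rfl, foldl_encT]
    rfl

lemma B_eq (num : String) :
    largestGoodInteger_alt num =
      (match dig9.find? (fun d => decide ((t3 d).toList <:+: num.toList)) with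
        | some d => t3 d | none => "") := by
  have hr : PySem.List.pyRange 9 (-1) (-1) = dig9 := by decide
  rw [largestGoodInteger_alt, hr, lgiProbe_find? num dig9]
  have : (fun d => PySem.Str.isIn (t3 d) num) = (fun d => decide ((t3 d).toList <:+: num.toList)) := by
    funext d; exact isIn_eq_decide _ _
  rw [this]

-- ===== VERDICT (by name: the statement is the Claim_ definition above) =====
set_option maxHeartbeats 1000000 in
theorem largestGoodInteger_spec : Claim_equal_largestGoodInteger := by
  intro num _ hpre
  unfold Spec_largestGoodInteger
  rw [A_eq num, B_eq num]
  rcases hfold : (TL num.toList).foldl omax none with _ | M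
  · have hTL : TL num.toList = [] := foldl_omax_nil_none _ hfold
    have hnone : dig9.find? (fun d => decide ((t3 d).toList <:+: num.toList)) = none := by
      rw [List.find?_eq_none]
      intro d hd
      obtain ⟨hd0, hd10⟩ := dig9_bounds d hd
      have hdn : d = ((d.toNat : Nat) : Int) := by omega
      simp only [decide_eq_true_eq]
      intro hinf
      rw [hdn, t3_dchar d.toNat (by omega)] at hinf
      have : dchar d.toNat ∈ TL num.toList := (TL_mem _ _).2 hinf
      rw [hTL] at this
      simp at this
    rw [hnone]
    rfl
  · -- M is the recorded maximum
    have hM_mem : M ∈ TL num.toList := by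
      rcases foldl_omax_mem _ _ _ hfold with h | h
      · exact h
      · exact absurd h (by simp)
    have hM_inf : [M, M, M] <:+: num.toList := (TL_mem _ _).1 hM_mem
    have hM_in : M ∈ num.toList := hM_inf.subset (by simp)
    have hM_dig : M.isDigit := pre_forall num hpre M hM_in hM_inf
    obtain ⟨dM, hdM10, hMd⟩ := digit_eq_dchar M hM_dig
    have hub := (foldl_omax_ub _ _ _ hfold).1
    have hfind : dig9.find? (fun d => decide ((t3 d).toList <:+: num.toList)) = some ((dM : Nat) : Int) := by
      apply find?_max _ _ _ dig9_sorted (dchar_mem_dig9 dM hdM10)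
      · simp only [decide_eq_true_eq]
        rw [t3_dchar dM hdM10, ← hMd]
        exact hM_inf
      · intro d hd hp
        obtain ⟨hd0, hd10⟩ := dig9_bounds d hd
        have hdn : d = ((d.toNat : Nat) : Int) := by omega
        simp only [decide_eq_true_eq] at hp
        rw [hdn, t3_dchar d.toNat (by omega)] at hp
        have hmem : dchar d.toNat ∈ TL num.toList := (TL_mem _ _).2 hp
        have hle := hub _ hmem
        rw [hMd] at hle
        have hiff := val3_lt_iff d.toNat (by omega) dM hdM10
        have hdle : d.toNat ≤ dM := by
          by_contra hgt
          exact hle (hiff.2 (by omega))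
        omega
    rw [hfind]
    show encT (some M) = t3 ((dM : Nat) : Int)
    rw [t3_eq_trip dM hdM10, hMd]
    rfl
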